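-- pv_equiv track=rewrite | github.com/theanilbajar/test | ui.py | generate_mermaid
-- ===== SOURCE A (Python) =====
-- def generate_mermaid(history, initial_query):
--     lines = ["graph LR"]
--     prev = f"Query[\"{initial_query}\"]"
--     for i, step in enumerate(history):
--         tool_node = f"Tool{i}[{step['tool']}]"
--         resp_node = f"Resp{i}[\"{step['response']}\"]"
--         lines.append(f"{prev} --> {tool_node}")
--         lines.append(f"{tool_node} --> {resp_node}")
--         prev = resp_node
--     return "\n".join(lines)
-- ===== SOURCE B (Python) =====
-- def generate_mermaid(history, initial_query):
--     def edges(i, prev, steps):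
--         if not steps:
--             return ""
--         step, rest = steps[0], steps[1:]
--         tool = f"Tool{i}[{step['tool']}]"
--         resp = f"Resp{i}[\"{step['response']}\"]"
--         return f"\n{prev} --> {tool}\n{tool} --> {resp}" + edges(i + 1, resp, rest)
--     return "graph LR" + edges(0, f"Query[\"{initial_query}\"]", history)
-- ===== Notes on version B (the rewrite author's own statement) =====
-- stated objective: alternative
-- what changed: Replaces the list-accumulator loop plus final '\n'.join with a direct recursion over the steps that concatenates each pair of edge lines (with their leading newlines) straight onto the result string, so no intermediate list is built.
import Mathlib
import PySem

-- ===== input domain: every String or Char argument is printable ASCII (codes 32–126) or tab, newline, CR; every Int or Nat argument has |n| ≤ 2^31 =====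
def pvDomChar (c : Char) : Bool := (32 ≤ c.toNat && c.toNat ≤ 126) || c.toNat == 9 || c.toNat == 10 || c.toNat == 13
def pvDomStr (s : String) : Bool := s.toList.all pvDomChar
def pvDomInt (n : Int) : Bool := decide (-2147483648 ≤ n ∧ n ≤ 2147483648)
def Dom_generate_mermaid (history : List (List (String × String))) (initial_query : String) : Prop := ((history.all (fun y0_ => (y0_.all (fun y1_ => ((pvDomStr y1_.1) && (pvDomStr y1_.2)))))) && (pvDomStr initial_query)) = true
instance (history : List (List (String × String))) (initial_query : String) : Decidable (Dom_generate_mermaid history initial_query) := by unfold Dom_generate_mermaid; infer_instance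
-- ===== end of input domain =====

-- B replaces A's list-accumulator loop + final "\n".join by a direct recursion over the
-- steps that concatenates each edge line (with its leading newline) straight onto the
-- output string; same output, no speed claim.

-- ===== PORT A =====
-- step['tool'] / step['response'] are first-match lookups in the association list; getD is
-- exact under Pre_ (both keys present); a missing key is a KeyError excluded by Pre_.
def generate_mermaid (history : List (List (String × String))) (initial_query : String) : String :=
  let init : List String := ["graph LR"]
  let prev0 : String := "Query[\"" ++ initial_query ++ "\"]"
  let res := (PySem.List.enumerate history 0).foldl
    (fun (st : List String × String) p =>
      let tool_node := "Tool" ++ PySem.Int.toStr p.1 ++ "[" ++ ((p.2.lookup "tool").getD "") ++ "]"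
      let resp_node := "Resp" ++ PySem.Int.toStr p.1 ++ "[\"" ++ ((p.2.lookup "response").getD "") ++ "\"]"
      (st.1 ++ [st.2 ++ " --> " ++ tool_node, tool_node ++ " --> " ++ resp_node], resp_node))
    (init, prev0)
  PySem.Str.join "\n" res.1

-- ===== PORT B =====
-- the inner recursive helper `edges(i, prev, steps)` of Source B
def pvEdgesB (i : Int) (prev : String) : List (List (String × String)) → String
  | [] => ""
  | step :: rest =>
      let tool := "Tool" ++ PySem.Int.toStr i ++ "[" ++ ((step.lookup "tool").getD "") ++ "]"
      let resp := "Resp" ++ PySem.Int.toStr i ++ "[\"" ++ ((step.lookup "response").getD "") ++ "\"]"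
      "\n" ++ prev ++ " --> " ++ tool ++ "\n" ++ tool ++ " --> " ++ resp ++
        pvEdgesB (i + 1) resp rest

def generate_mermaid_alt (history : List (List (String × String))) (initial_query : String) : String :=
  "graph LR" ++ pvEdgesB 0 ("Query[\"" ++ initial_query ++ "\"]") history

-- ===== PRECONDITION & SPEC =====
-- Pre_ admits exactly the inputs where Python A returns: each step must carry both the
-- 'tool' and the 'response' key, otherwise A (and B) raise KeyError.
def Pre_generate_mermaid (history : List (List (String × String))) (initial_query : String) : Prop :=
  history.all (fun step => ((step.lookup "tool").isSome && (step.lookup "response").isSome)) = true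
instance (history : List (List (String × String))) (initial_query : String) : Decidable (Pre_generate_mermaid history initial_query) := by unfold Pre_generate_mermaid; infer_instance

def pvWitness_generate_mermaid : (List (List (String × String))) × String :=
  ([[("tool", "search"), ("response", "ok")]], "hello")

def Spec_generate_mermaid (history : List (List (String × String))) (initial_query : String) (out : String) : Prop := out = generate_mermaid_alt history initial_query
instance (history : List (List (String × String))) (initial_query : String) (out : String) : Decidable (Spec_generate_mermaid history initial_query out) := by unfold Spec_generate_mermaid; infer_instance

-- ===== CLAIM (what is proved, stated in full; the proofs are below) =====
def Claim_equal_generate_mermaid : Prop := ∀ (history : List (List (String × String))) (initial_query : String), Dom_generate_mermaid history initial_query → Pre_generate_mermaid history initial_query → Spec_generate_mermaid history initial_query (generate_mermaid history initial_query)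

-- ===== LEMMAS AND PROOFS =====

-- per-step node labels (proof-only abbreviations)
def pvTool (p : Int × List (String × String)) : String :=
  "Tool" ++ PySem.Int.toStr p.1 ++ "[" ++ ((p.2.lookup "tool").getD "") ++ "]"
def pvResp (p : Int × List (String × String)) : String :=
  "Resp" ++ PySem.Int.toStr p.1 ++ "[\"" ++ ((p.2.lookup "response").getD "") ++ "\"]"

-- appending two more pieces shifts out of the join as two '\n'-prefixed suffixes
theorem pvCharsJoin2 (x : List Char) (xs : List (List Char)) (a b : List Char) :
    PySem.Chars.join ['\n'] (x :: (xs ++ [a, b])) =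
      PySem.Chars.join ['\n'] (x :: xs) ++ '\n' :: a ++ '\n' :: b := by
  induction xs generalizing x with
  | nil => simp [PySem.Chars.join_cons_cons, PySem.Chars.join_singleton]
  | cons y ys ih =>
      rw [show x :: (y :: ys ++ [a, b]) = x :: y :: (ys ++ [a, b]) from by simp,
        PySem.Chars.join_cons_cons, PySem.Chars.join_cons_cons, ih]
      simp

theorem pvJoin2 (x : String) (xs : List String) (a b : String) :
    PySem.Str.join "\n" (x :: (xs ++ [a, b])) =
      PySem.Str.join "\n" (x :: xs) ++ ("\n" ++ a ++ ("\n" ++ b)) := by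
  simp only [PySem.Str.join, List.map_append, List.map_cons, List.map_nil]
  rw [← String.toList_inj]
  have := pvCharsJoin2 x.toList (xs.map String.toList) a.toList b.toList
  simp [this]

-- A's loop + join, characterised against B's recursion
theorem pvFoldJoin (h : List (List (String × String))) (s : Int)
    (x : String) (xs : List String) (prev : String) :
    PySem.Str.join "\n"
      ((PySem.List.enumerate h s).foldl
        (fun (st : List String × String) p =>
          (st.1 ++ [st.2 ++ " --> " ++ pvTool p, pvTool p ++ " --> " ++ pvResp p], pvResp p))
        (x :: xs, prev)).1
    = PySem.Str.join "\n" (x :: xs) ++ pvEdgesB s prev h := by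
  induction h generalizing s x xs prev with
  | nil => simp [PySem.List.enumerate_nil, pvEdgesB]
  | cons step rest ih =>
      rw [PySem.List.enumerate_cons]
      simp only [List.foldl_cons, List.cons_append]
      rw [ih, pvJoin2]
      simp only [pvEdgesB, pvTool, pvResp]
      rw [← String.toList_inj]
      simp

-- ===== VERDICT (by name: the statement is the Claim_ definition above) =====
theorem generate_mermaid_spec : Claim_equal_generate_mermaid := by
  intro history initial_query _ _
  unfold Spec_generate_mermaid generate_mermaid generate_mermaid_alt
  simp only []
  rw [show (fun (st : List String × String) (p : Int × List (String × String)) =>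
        ((st.1 ++ [st.2 ++ " --> " ++ ("Tool" ++ PySem.Int.toStr p.1 ++ "[" ++ ((p.2.lookup "tool").getD "") ++ "]"),
          ("Tool" ++ PySem.Int.toStr p.1 ++ "[" ++ ((p.2.lookup "tool").getD "") ++ "]") ++ " --> " ++
            ("Resp" ++ PySem.Int.toStr p.1 ++ "[\"" ++ ((p.2.lookup "response").getD "") ++ "\"]")],
          ("Resp" ++ PySem.Int.toStr p.1 ++ "[\"" ++ ((p.2.lookup "response").getD "") ++ "\"]")) : List String × String))
      = fun (st : List String × String) p =>
        (st.1 ++ [st.2 ++ " --> " ++ pvTool p, pvTool p ++ " --> " ++ pvResp p], pvResp p)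
    from rfl]
  rw [pvFoldJoin]
  rw [← String.toList_inj]
  simp [PySem.Str.join, PySem.Chars.join_singleton]
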